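-- pv_equiv track=rewrite | github.com/yoyodahary/ReaserchProject | useful_functions.py | magic_stat_even
-- ===== SOURCE A (Python) =====
-- def magic_stat_even(rep):
--   sum = 0
--   for i in range(len(rep)):
--     for j in range(i+1,len(rep)):
--       if rep[i]<rep[j] and rep[i]%2==1:
--         sum += 1
--   for i in range(len(rep)-1):
--     if rep[i]<rep[i+1] and rep[i]%2==0:
--       sum+=len(rep)-(i+1)
--   return sum
-- ===== SOURCE B (Python) =====
-- import bisect
--
-- def magic_stat_even(rep):
--     n = len(rep)
--     total = 0
--     suffix = []  # sorted multiset of rep[i+1:]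
--     for i in range(n - 1, -1, -1):
--         v = rep[i]
--         if v % 2 == 1:
--             # odd: count elements strictly greater than v to the right
--             total += len(suffix) - bisect.bisect_right(suffix, v)
--         elif i + 1 < n and v < rep[i + 1]:
--             # even: A's second loop adds n-(i+1) = length of the suffix
--             total += n - (i + 1)
--         bisect.insort(suffix, v)
--     return total
-- ===== Notes on version B (the rewrite author's own statement) =====
-- stated objective: faster
-- what changed: Replaces A's O(n^2) nested pair scan by a single right-to-left pass that maintains a sorted suffix and counts greater elements with binary search (bisect), folding the adjacent-even bonus into the same pass.
import Mathlib
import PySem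

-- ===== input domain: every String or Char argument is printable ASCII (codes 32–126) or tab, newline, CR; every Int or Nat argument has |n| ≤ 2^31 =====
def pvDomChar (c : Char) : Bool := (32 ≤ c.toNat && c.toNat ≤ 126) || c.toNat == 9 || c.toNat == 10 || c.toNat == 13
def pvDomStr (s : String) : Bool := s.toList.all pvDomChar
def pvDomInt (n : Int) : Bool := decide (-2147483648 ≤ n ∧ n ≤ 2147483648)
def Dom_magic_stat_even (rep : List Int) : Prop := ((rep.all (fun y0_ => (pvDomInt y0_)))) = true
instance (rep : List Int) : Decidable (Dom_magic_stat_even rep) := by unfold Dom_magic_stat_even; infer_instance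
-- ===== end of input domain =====

-- B replaces A's O(n^2) nested pair scan by one right-to-left pass over a sorted suffix with binary search.

-- ===== PORT A =====
-- literal port of A: two index loops; rep[i] via pyGetD (every access is in range)
def magic_stat_even (rep : List Int) : Int :=
  let n : Int := rep.length
  let s1 : Int := (PySem.List.pyRange 0 n 1).foldl (fun s i =>
      (PySem.List.pyRange (i+1) n 1).foldl (fun s j =>
        if PySem.List.pyGetD rep i 0 < PySem.List.pyGetD rep j 0 ∧
           PySem.Int.mod (PySem.List.pyGetD rep i 0) 2 = 1 then s + 1 else s) s) 0
  (PySem.List.pyRange 0 (n-1) 1).foldl (fun s i =>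
      if PySem.List.pyGetD rep i 0 < PySem.List.pyGetD rep (i+1) 0 ∧
         PySem.Int.mod (PySem.List.pyGetD rep i 0) 2 = 0 then s + (n - (i+1)) else s) s1

-- ===== PORT B =====
-- bisect.insort l v (stdlib call): insertion at the bisect_right position
def insortRight (l : List Int) (v : Int) : List Int :=
  let k := PySem.List.bisectRight l v
  l.take k ++ v :: l.drop k

-- B's loop 'for i in range(n-1, -1, -1)' as structural recursion from the right:
-- 'rest' is rep[i+1:], so len(rep)-(i+1) = rest.length and rep[i+1] = head of rest.
def msGo : List Int → List Int × Int
  | [] => ([], 0)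
  | v :: rest =>
    let p := msGo rest
    let tot' : Int :=
      if PySem.Int.mod v 2 = 1 then
        p.2 + ((p.1.length - PySem.List.bisectRight p.1 v : Nat) : Int)
      else
        match rest with
        | [] => p.2
        | w :: _ => if v < w then p.2 + (rest.length : Int) else p.2
    (insortRight p.1 v, tot')

def magic_stat_even_alt (rep : List Int) : Int := (msGo rep).2

-- ===== PRECONDITION & SPEC =====
def Spec_magic_stat_even (rep : List Int) (out : Int) : Prop := out = magic_stat_even_alt rep
instance (rep : List Int) (out : Int) : Decidable (Spec_magic_stat_even rep out) := by unfold Spec_magic_stat_even; infer_instance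

-- ===== CLAIM (what is proved, stated in full; the proofs are below) =====
def Claim_equal_magic_stat_even : Prop := ∀ (rep : List Int), Dom_magic_stat_even rep → Spec_magic_stat_even rep (magic_stat_even rep)

-- ===== LEMMAS AND PROOFS =====

-- contribution of A's first loop: for each odd head, the greater elements to its right
def fOdd : List Int → Int
  | [] => 0
  | v :: rest =>
    (if PySem.Int.mod v 2 = 1 then (rest.countP (fun y => decide (v < y)) : Int) else 0) + fOdd rest

-- contribution of A's second loop: adjacent increase at an even element pays the suffix length
def gEven : List Int → Int
  | [] => 0
  | [_] => 0
  | v :: w :: rest =>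
    (if v < w ∧ PySem.Int.mod v 2 = 0 then ((rest.length : Int) + 1) else 0) + gEven (w :: rest)

-- ----- B-side: msGo computes fOdd + gEven -----

theorem bisectRight_sorted_count (l : List Int) (v : Int) (hs : l.Pairwise (· ≤ ·)) :
    (l.length - PySem.List.bisectRight l v : Nat) = l.countP (fun y => decide (v < y)) := by
  obtain ⟨hk, hle, hgt⟩ := PySem.List.bisectRight_spec l v hs
  set k := PySem.List.bisectRight l v with hkdef
  conv_rhs => rw [← List.take_append_drop k l]
  rw [List.countP_append]
  have h1 : (l.take k).countP (fun y => decide (v < y)) = 0 := by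
    rw [List.countP_eq_zero]
    intro x hx
    obtain ⟨j, hj, rfl⟩ := List.mem_iff_getElem.mp hx
    have hjk : j < k := by simp at hj; omega
    simp only [List.getElem_take]
    have := hle j (by omega) hjk
    simpa using not_lt.mpr this
  have h2 : (l.drop k).countP (fun y => decide (v < y)) = (l.drop k).length := by
    rw [List.countP_eq_length]
    intro x hx
    obtain ⟨j, hj, rfl⟩ := List.mem_iff_getElem.mp hx
    have hj' : k + j < l.length := by simp at hj; omega
    rw [List.getElem_drop]
    simpa using hgt (k+j) hj' (by omega)
  rw [h1, h2]
  simp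

theorem insortRight_perm (l : List Int) (v : Int) : (insortRight l v).Perm (v :: l) := by
  unfold insortRight
  refine (List.perm_middle).trans ?_
  rw [List.take_append_drop]

theorem insortRight_sorted (l : List Int) (v : Int) (hs : l.Pairwise (· ≤ ·)) :
    (insortRight l v).Pairwise (· ≤ ·) := by
  obtain ⟨hk, hle, hgt⟩ := PySem.List.bisectRight_spec l v hs
  unfold insortRight
  set k := PySem.List.bisectRight l v with hkdef
  have hvd : ∀ y ∈ l.drop k, v ≤ y := by
    intro y hy
    obtain ⟨j, hj, rfl⟩ := List.mem_iff_getElem.mp hy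
    have hj' : k + j < l.length := by simp at hj; omega
    rw [List.getElem_drop]
    exact le_of_lt (hgt (k+j) hj' (by omega))
  have htv : ∀ x ∈ l.take k, x ≤ v := by
    intro x hx
    obtain ⟨j, hj, rfl⟩ := List.mem_iff_getElem.mp hx
    have hjk : j < k := by simp at hj; omega
    simp only [List.getElem_take]
    exact hle j (by omega) hjk
  rw [List.pairwise_append]
  refine ⟨hs.sublist (List.take_sublist k l), ?_, ?_⟩
  · rw [List.pairwise_cons]
    exact ⟨hvd, hs.sublist (List.drop_sublist k l)⟩
  · intro x hx y hy
    rcases List.mem_cons.mp hy with rfl | hy'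
    · exact htv x hx
    · exact le_trans (htv x hx) (hvd y hy')

theorem msGo_spec (rep : List Int) :
    (msGo rep).1.Perm rep ∧ (msGo rep).1.Pairwise (· ≤ ·) ∧
      (msGo rep).2 = fOdd rep + gEven rep := by
  induction rep with
  | nil => simp [msGo, fOdd, gEven]
  | cons v rest ih =>
    obtain ⟨hperm, hsort, htot⟩ := ih
    refine ⟨?_, insortRight_sorted _ _ hsort, ?_⟩
    · exact (insortRight_perm _ _).trans (hperm.cons v)
    · cases rest with
      | nil =>
        show (if PySem.Int.mod v 2 = 1 then
              (msGo []).2 + (((msGo []).1.length - PySem.List.bisectRight (msGo []).1 v : Nat) : Int)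
            else (msGo []).2) = fOdd [v] + gEven [v]
        rcases PySem.Int.mod_two_eq v with h0 | h1 <;>
          simp [msGo, fOdd, gEven, *]
      | cons w rest' =>
        show (if PySem.Int.mod v 2 = 1 then
              (msGo (w::rest')).2 + (((msGo (w::rest')).1.length - PySem.List.bisectRight (msGo (w::rest')).1 v : Nat) : Int)
            else if v < w then (msGo (w::rest')).2 + (((w::rest').length : Nat) : Int) else (msGo (w::rest')).2)
            = fOdd (v :: w :: rest') + gEven (v :: w :: rest')
        have hcount : (((msGo (w::rest')).1.length - PySem.List.bisectRight (msGo (w::rest')).1 v : Nat) : Int)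
            = ((w::rest').countP (fun y => decide (v < y)) : Int) := by
          rw [bisectRight_sorted_count _ _ hsort, hperm.countP_eq]
        rcases PySem.Int.mod_two_eq v with h0 | h1
        · rw [if_neg (show ¬ PySem.Int.mod v 2 = 1 by rw [h0]; decide)]
          simp only [fOdd, gEven, htot, h0, List.length_cons]
          norm_num
          split_ifs <;> push_cast <;> ring
        · rw [if_pos h1, hcount, htot]
          simp only [fOdd, gEven, h1, List.length_cons]
          norm_num
          ring

-- ----- A-side first loop -----

-- coefficient of index i in A's first loop
def cOdd (rep : List Int) (i : Int) : Int :=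
  ((rep.drop (i+1).toNat).countP (fun y =>
    decide (PySem.List.pyGetD rep i 0 < y ∧ PySem.Int.mod (PySem.List.pyGetD rep i 0) 2 = 1)) : Int)

theorem cOdd_head (v : Int) (rest : List Int) :
    cOdd (v :: rest) ((0:Nat) : Int) =
      (if PySem.Int.mod v 2 = 1 then (rest.countP (fun y => decide (v < y)) : Int) else 0) := by
  simp only [cOdd, PySem.List.pyGetD_natCast, List.getD_cons_zero]
  norm_num
  rcases Int.emod_two_eq v with h | h <;> simp [h]

theorem cOdd_tail (v : Int) (rest : List Int) (k : Nat) :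
    cOdd (v :: rest) (((k+1:Nat)) : Int) = cOdd rest ((k : Nat) : Int) := by
  simp only [cOdd, PySem.List.pyGetD_natCast, List.getD_cons_succ]
  have h1 : (((k+1:Nat):Int)+1).toNat = k + 2 := by omega
  have h2 : (((k:Nat):Int)+1).toNat = k + 1 := by omega
  rw [h1, h2]
  rfl

theorem sum_cOdd (rep : List Int) :
    ((PySem.List.pyRange 0 (rep.length : Int) 1).map (cOdd rep)).sum = fOdd rep := by
  induction rep with
  | nil => simp [PySem.List.pyRange_one_eq_nil, fOdd]
  | cons v rest ih =>
    rw [PySem.List.pyRange_one] at *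
    simp only [sub_zero, Int.toNat_natCast, List.map_map, Function.comp_def, zero_add] at *
    rw [List.length_cons, List.range_succ_eq_map]
    simp only [List.map_cons, List.sum_cons, List.map_map, Function.comp_def]
    rw [cOdd_head]
    have : (List.map (fun k => cOdd (v :: rest) ((k.succ : Nat) : Int)) (List.range rest.length)).sum
         = (List.map (fun k => cOdd rest ((k : Nat) : Int)) (List.range rest.length)).sum := by
      congr 1
      apply List.map_congr_left
      intro k _
      simpa [Nat.succ_eq_add_one] using cOdd_tail v rest k
    rw [this, ih]
    simp [fOdd]

theorem A_first_loop (rep : List Int) :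
    (PySem.List.pyRange 0 (rep.length : Int) 1).foldl (fun s i =>
      (PySem.List.pyRange (i+1) (rep.length : Int) 1).foldl (fun s j =>
        if PySem.List.pyGetD rep i 0 < PySem.List.pyGetD rep j 0 ∧
           PySem.Int.mod (PySem.List.pyGetD rep i 0) 2 = 1 then s + 1 else s) s) 0
    = fOdd rep := by
  rw [← sum_cOdd rep]
  rw [PySem.List.foldl_congr_mem _ _ (fun s i => s + cOdd rep i)]
  · rw [PySem.List.foldl_add]
    ring
  · intro s i hi
    have h0i : 0 ≤ i := (PySem.List.mem_pyRange_one.mp hi).1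
    rw [PySem.List.foldl_pyRange_pyGetD' rep 0
        (fun s y => if PySem.List.pyGetD rep i 0 < y ∧ PySem.Int.mod (PySem.List.pyGetD rep i 0) 2 = 1 then s + 1 else s)
        s (by omega : (0:Int) ≤ i + 1)]
    rw [PySem.List.foldl_ite_add_one]
    rfl

-- ----- A-side second loop -----

-- coefficient of index i in A's second loop
def cEven (rep : List Int) (i : Int) : Int :=
  if PySem.List.pyGetD rep i 0 < PySem.List.pyGetD rep (i+1) 0 ∧
     PySem.Int.mod (PySem.List.pyGetD rep i 0) 2 = 0 then (rep.length : Int) - (i+1) else 0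

theorem cEven_tail (v : Int) (rest : List Int) (k : Nat) :
    cEven (v :: rest) (((k+1:Nat)) : Int) = cEven rest ((k : Nat) : Int) := by
  simp only [cEven, PySem.List.pyGetD_natCast]
  have h1 : ((k+1:Nat):Int) + 1 = ((k+2:Nat):Int) := by push_cast; ring
  have h2 : ((k:Nat):Int) + 1 = ((k+1:Nat):Int) := by push_cast; ring
  rw [h1, h2]
  simp only [PySem.List.pyGetD_natCast, List.getD_cons_succ, List.length_cons]
  split_ifs <;> push_cast <;> ring

theorem sum_cEven (rep : List Int) :
    ((PySem.List.pyRange 0 ((rep.length : Int) - 1) 1).map (cEven rep)).sum = gEven rep := by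
  induction rep with
  | nil => simp [PySem.List.pyRange_one_eq_nil, gEven]
  | cons v rest ih =>
    cases rest with
    | nil => simp [PySem.List.pyRange_one_eq_nil, gEven]
    | cons w rest' =>
      rw [PySem.List.pyRange_one] at *
      simp only [sub_zero, List.map_map, Function.comp_def, zero_add] at *
      rw [show (((v :: w :: rest').length : Int) - 1).toNat = rest'.length + 1 by
        simp only [List.length_cons]; omega]
      rw [show (((w :: rest').length : Int) - 1).toNat = rest'.length by
        simp only [List.length_cons]; omega] at ih
      rw [List.range_succ_eq_map]
      simp only [List.map_cons, List.sum_cons, List.map_map, Function.comp_def]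
      have hhead : cEven (v :: w :: rest') ((0:Nat) : Int) =
          (if v < w ∧ PySem.Int.mod v 2 = 0 then ((rest'.length : Int) + 1) else 0) := by
        have e1 : PySem.List.pyGetD (v :: w :: rest') (((0:Nat):Int)) 0 = v := by
          simp
        have e2 : PySem.List.pyGetD (v :: w :: rest') (((0:Nat):Int) + 1) 0 = w := by
          have : ((0:Nat):Int) + 1 = ((1:Nat):Int) := by norm_num
          rw [this, PySem.List.pyGetD_natCast]
          rfl
        simp only [cEven, e1, e2, List.length_cons]
        split_ifs <;> push_cast <;> ring
      have htail : (List.map (fun k => cEven (v :: w :: rest') ((k.succ : Nat) : Int)) (List.range rest'.length)).sum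
          = (List.map (fun k => cEven (w :: rest') ((k : Nat) : Int)) (List.range rest'.length)).sum := by
        congr 1
        apply List.map_congr_left
        intro k _
        simpa [Nat.succ_eq_add_one] using cEven_tail v (w :: rest') k
      rw [hhead, htail, ih]
      simp [gEven]

theorem A_second_loop (rep : List Int) (init : Int) :
    (PySem.List.pyRange 0 ((rep.length : Int) - 1) 1).foldl (fun s i =>
      if PySem.List.pyGetD rep i 0 < PySem.List.pyGetD rep (i+1) 0 ∧
         PySem.Int.mod (PySem.List.pyGetD rep i 0) 2 = 0 then s + ((rep.length : Int) - (i+1)) else s) init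
    = init + gEven rep := by
  rw [← sum_cEven rep]
  rw [PySem.List.foldl_congr_mem _ _ (fun s i => s + cEven rep i)]
  · rw [PySem.List.foldl_add]
  · intro s i _
    simp only [cEven]
    split_ifs <;> ring

-- ===== VERDICT (by name: the statement is the Claim_ definition above) =====
theorem magic_stat_even_spec : Claim_equal_magic_stat_even := by
  intro rep _
  show magic_stat_even rep = magic_stat_even_alt rep
  show (PySem.List.pyRange 0 ((rep.length : Int) - 1) 1).foldl (fun s i =>
      if PySem.List.pyGetD rep i 0 < PySem.List.pyGetD rep (i+1) 0 ∧
         PySem.Int.mod (PySem.List.pyGetD rep i 0) 2 = 0 then s + ((rep.length : Int) - (i+1)) else s)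
      ((PySem.List.pyRange 0 (rep.length : Int) 1).foldl (fun s i =>
        (PySem.List.pyRange (i+1) (rep.length : Int) 1).foldl (fun s j =>
          if PySem.List.pyGetD rep i 0 < PySem.List.pyGetD rep j 0 ∧
             PySem.Int.mod (PySem.List.pyGetD rep i 0) 2 = 1 then s + 1 else s) s) 0)
      = magic_stat_even_alt rep
  rw [A_first_loop, A_second_loop, magic_stat_even_alt, (msGo_spec rep).2.2]
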